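-- pv_equiv track=rewrite | github.com/adamcharnock/django-hordak | hordak/utilities/migrations.py | _is_empty_sql_statement
-- ===== SOURCE A (Python) =====
-- def _is_empty_sql_statement(sql: str) -> bool:
--     """Remove comments and strip whitespace"""
--     lines = sql.split("\n")
--     lines = [
--         line.strip()
--         for line in lines
--         if not line.strip().startswith("--") and line.strip()
--     ]
--     return not bool(lines)
-- ===== SOURCE B (Python) =====
-- def _is_empty_sql_statement(sql: str) -> bool:
--     """Single pass over the characters: skip whitespace; at the first
--     non-space character of a line, a '--' sends us to the end of the line,
--     anything else is real SQL."""
--     i, n = 0, len(sql)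
--     while i < n:
--         c = sql[i]
--         if c.isspace():
--             i += 1
--         elif sql.startswith("--", i):
--             while i < n and sql[i] != "\n":
--                 i += 1
--         else:
--             return False
--     return True
-- ===== Notes on version B (the rewrite author's own statement) =====
-- stated objective: alternative
-- what changed: Replaces A's split-into-lines / strip-each-line / filter / emptiness-test pipeline (which materialises the line list twice) with a single character scan that short-circuits at the first real SQL character, skipping whitespace and '--'-to-end-of-line comments in place.
import Mathlib
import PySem

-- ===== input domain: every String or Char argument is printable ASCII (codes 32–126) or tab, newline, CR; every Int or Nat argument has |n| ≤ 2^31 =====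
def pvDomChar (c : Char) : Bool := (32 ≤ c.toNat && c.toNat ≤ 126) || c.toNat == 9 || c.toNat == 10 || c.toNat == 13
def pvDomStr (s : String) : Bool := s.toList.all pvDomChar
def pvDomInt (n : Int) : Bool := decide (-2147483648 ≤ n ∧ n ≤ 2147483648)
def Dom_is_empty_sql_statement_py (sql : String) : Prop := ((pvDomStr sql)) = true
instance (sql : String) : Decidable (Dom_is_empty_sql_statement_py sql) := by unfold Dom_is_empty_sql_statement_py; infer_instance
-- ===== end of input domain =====

-- B replaces A's split/strip/filter line pipeline with one linear character scan
-- that exits at the first real SQL character (objective: alternative; same asymptotic cost).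


-- ===== PORT A =====
-- lines = sql.split("\n"); keep the stripped lines that are non-comment and non-blank; empty?
def is_empty_sql_statement_py (sql : String) : Bool :=
  let lines := PySem.Chars.splitOn sql.toList ['\n']
  let lines2 := (lines.filter (fun line =>
      !PySem.Chars.startswith (PySem.Chars.strip line) ['-', '-']
        && !(PySem.Chars.strip line).isEmpty)).map (fun line => PySem.Chars.strip line)
  lines2.isEmpty

-- ===== PORT B =====
-- inner `while i < n and sql[i] != "\n"` of Source B: advance to the next newline (or the end)
def altSkipLine : List Char → List Char
  | [] => []
  | c :: rest => if c = '\n' then c :: rest else altSkipLine rest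

theorem altSkipLine_length_le (l : List Char) : (altSkipLine l).length ≤ l.length := by
  induction l with
  | nil => simp [altSkipLine]
  | cons c rest ih =>
      simp only [altSkipLine]
      split
      · simp
      · exact Nat.le_succ_of_le ih

-- outer while of Source B, on the remaining characters sql[i:]
def altScan : List Char → Bool
  | [] => true
  | c :: rest =>
      if PySem.Chars.isspace c then altScan rest
      else if PySem.Chars.startswith (c :: rest) ['-', '-'] then altScan (altSkipLine rest)
      else false
termination_by l => l.length
decreasing_by
  · simp
  · exact Nat.lt_succ_of_le (altSkipLine_length_le rest)

def is_empty_sql_statement_py_alt (sql : String) : Bool := altScan sql.toList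

-- ===== PRECONDITION & SPEC =====
def Spec_is_empty_sql_statement_py (sql : String) (out : Bool) : Prop := out = is_empty_sql_statement_py_alt sql
instance (sql : String) (out : Bool) : Decidable (Spec_is_empty_sql_statement_py sql out) := by unfold Spec_is_empty_sql_statement_py; infer_instance

-- ===== CLAIM (what is proved, stated in full; the proofs are below) =====
def Claim_equal_is_empty_sql_statement_py : Prop := ∀ (sql : String), Dom_is_empty_sql_statement_py sql → Spec_is_empty_sql_statement_py sql (is_empty_sql_statement_py sql)

-- ===== LEMMAS AND PROOFS =====

-- a line of A's pipeline survives the filter iff it is NOT lineOk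
def lineOk (l : List Char) : Bool :=
  (PySem.Chars.strip l).isEmpty || PySem.Chars.startswith (PySem.Chars.strip l) ['-', '-']

-- naive structural split on '\n' (proof vehicle relating the two ports)
def simpleSplit : List Char → List (List Char)
  | [] => [[]]
  | c :: rest =>
      if c = '\n' then [] :: simpleSplit rest
      else (c :: (simpleSplit rest).headI) :: (simpleSplit rest).tail

theorem simpleSplit_ne_nil (l : List Char) : simpleSplit l ≠ [] := by
  cases l with
  | nil => simp [simpleSplit]
  | cons c rest => simp only [simpleSplit]; split <;> simp

theorem strip_cons_space {c : Char} (l : List Char) (h : PySem.Chars.isspace c = true) :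
    PySem.Chars.strip (c :: l) = PySem.Chars.strip l := by
  simp [PySem.Chars.strip, PySem.Chars.lstrip, h]

theorem rstrip_cons_nonspace {c : Char} (l : List Char) (h : PySem.Chars.isspace c = false) :
    PySem.Chars.rstrip (c :: l) = c :: PySem.Chars.rstrip l := by
  simp only [PySem.Chars.rstrip, List.reverse_cons, List.dropWhile_append]
  split
  · next he =>
      simp only [List.isEmpty_iff] at he
      simp [h, he]
  · simp [List.dropWhile_cons]

theorem strip_cons_nonspace {c : Char} (l : List Char) (h : PySem.Chars.isspace c = false) :
    PySem.Chars.strip (c :: l) = c :: PySem.Chars.rstrip l := by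
  simp [PySem.Chars.strip, PySem.Chars.lstrip, h,
    rstrip_cons_nonspace l h]

theorem rstrip_head? (l : List Char) :
    PySem.Chars.rstrip l = [] ∨ (PySem.Chars.rstrip l).head? = l.head? := by
  cases l with
  | nil => left; simp [PySem.Chars.rstrip]
  | cons c rest =>
      by_cases h : PySem.Chars.isspace c = true
      · by_cases hr : PySem.Chars.rstrip (c :: rest) = []
        · exact Or.inl hr
        · right
          -- rstrip is reverse (dropWhile … reverse): it is a prefix of the list
          have hpre : PySem.Chars.rstrip (c :: rest) <+: (c :: rest) := by
            simp only [PySem.Chars.rstrip]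
            have := List.dropWhile_suffix (l := (c :: rest).reverse) (p := PySem.Chars.isspace)
            simpa using this.reverse
          obtain ⟨t, ht⟩ := hpre
          cases hrs : PySem.Chars.rstrip (c :: rest) with
          | nil => exact absurd hrs hr
          | cons d ds =>
              rw [hrs] at ht
              simp only [List.cons_append] at ht
              injection ht with h1 _
              simp [h1]
      · right
        rw [rstrip_cons_nonspace rest (by simpa using h)]
        simp

-- the fuel-based splitOn.go computes simpleSplit
theorem headI_tail_simpleSplit (l : List Char) :
    (simpleSplit l).headI :: (simpleSplit l).tail = simpleSplit l := by
  cases h : simpleSplit l with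
  | nil => exact absurd h (simpleSplit_ne_nil l)
  | cons x xs => simp

theorem splitOn_go_eq (l : List Char) : ∀ (fuel : Nat) (cur : List Char) (acc : List (List Char)),
    l.length ≤ fuel →
    PySem.Chars.splitOn.go ['\n'] fuel l cur acc
      = acc.reverse ++ ((cur.reverse ++ (simpleSplit l).headI) :: (simpleSplit l).tail) := by
  induction l with
  | nil =>
      intro fuel cur acc _
      cases fuel <;> simp [PySem.Chars.splitOn.go, simpleSplit]
  | cons c rest ih =>
      intro fuel cur acc hfuel
      cases fuel with
      | zero => simp at hfuel
      | succ f =>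
          rw [PySem.Chars.splitOn.go]
          by_cases hc : c = '\n'
          · have hpre : List.isPrefixOf ['\n'] (c :: rest) = true := by
              simp [List.isPrefixOf, hc]
            rw [if_pos hpre]
            have : List.drop (['\n'] : List Char).length (c :: rest) = rest := by simp
            rw [this, ih f [] (cur.reverse :: acc) (by simpa using Nat.lt_succ_iff.mp (Nat.lt_of_lt_of_le (Nat.lt_succ_of_le le_rfl) hfuel))]
            simp [simpleSplit, hc, headI_tail_simpleSplit rest]
          · have hpre : List.isPrefixOf ['\n'] (c :: rest) = false := by
              simp [List.isPrefixOf]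
              exact fun h => hc h.symm
            rw [if_neg (by simp [hpre])]
            rw [ih f (c :: cur) acc (by simpa using Nat.succ_le_succ_iff.mp hfuel)]
            simp [simpleSplit, hc]

theorem splitOn_eq (cs : List Char) : PySem.Chars.splitOn cs ['\n'] = simpleSplit cs := by
  rw [PySem.Chars.splitOn, splitOn_go_eq cs (cs.length + 1) [] [] (Nat.le_succ _)]
  cases h : simpleSplit cs with
  | nil => exact absurd h (simpleSplit_ne_nil cs)
  | cons x xs => simp

-- what skipping to the newline does to the line structure
theorem skip_split (l : List Char) :
    simpleSplit (altSkipLine l) = [] :: (simpleSplit l).tail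
      ∨ (altSkipLine l = [] ∧ (simpleSplit l).tail = []) := by
  induction l with
  | nil => right; simp [altSkipLine, simpleSplit]
  | cons c rest ih =>
      by_cases hc : c = '\n'
      · left; simp [altSkipLine, simpleSplit, hc]
      · rw [show altSkipLine (c :: rest) = altSkipLine rest by simp [altSkipLine, hc],
          show simpleSplit (c :: rest) = (c :: (simpleSplit rest).headI) :: (simpleSplit rest).tail
            by simp [simpleSplit, hc]]
        simpa using ih

-- the scanner decides "every line is blank or a -- comment"
theorem altScan_eq : ∀ (n : Nat) (cs : List Char), cs.length ≤ n →
    altScan cs = (simpleSplit cs).all lineOk := by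
  intro n
  induction n with
  | zero =>
      intro cs h
      have : cs = [] := by cases cs <;> simp_all
      subst this
      simp [altScan, simpleSplit, lineOk, PySem.Chars.strip, PySem.Chars.lstrip, PySem.Chars.rstrip]
  | succ n ih =>
      intro cs hlen
      cases cs with
      | nil => simp [altScan, simpleSplit, lineOk, PySem.Chars.strip, PySem.Chars.lstrip, PySem.Chars.rstrip]
      | cons c rest =>
          have hrest : rest.length ≤ n := by simpa using Nat.succ_le_succ_iff.mp hlen
          by_cases hsp : PySem.Chars.isspace c = true
          · rw [show altScan (c :: rest) = altScan rest by simp [altScan, hsp], ih rest hrest]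
            by_cases hc : c = '\n'
            · simp [simpleSplit, hc, lineOk, PySem.Chars.strip, PySem.Chars.lstrip,
                PySem.Chars.rstrip]
            · cases hs : simpleSplit rest with
              | nil => exact absurd hs (simpleSplit_ne_nil rest)
              | cons h t =>
                  simp only [simpleSplit, if_neg hc, hs, List.headI, List.tail_cons, List.all_cons]
                  have : lineOk (c :: h) = lineOk h := by
                    simp [lineOk, strip_cons_space h hsp]
                  rw [this]
          · have hsp' : PySem.Chars.isspace c = false := by simpa using hsp
            have hcn : c ≠ '\n' := by rintro rfl; exact absurd hsp' (by decide)
            cases hs : simpleSplit rest with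
            | nil => exact absurd hs (simpleSplit_ne_nil rest)
            | cons h t =>
                have hsplit : simpleSplit (c :: rest) = (c :: h) :: t := by
                  simp [simpleSplit, hcn, hs]
                by_cases hdd : PySem.Chars.startswith (c :: rest) ['-', '-'] = true
                · -- a comment line
                  have hc : c = '-' := by
                    simp [PySem.Chars.startswith, List.isPrefixOf] at hdd
                    exact hdd.1.symm
                  obtain ⟨rest', hrest'⟩ : ∃ rest', rest = '-' :: rest' := by
                    cases rest with
                    | nil => simp [PySem.Chars.startswith, List.isPrefixOf] at hdd
                    | cons r rest' =>
                        have : r = '-' := by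
                          simp [PySem.Chars.startswith, List.isPrefixOf] at hdd
                          exact hdd.2.symm
                        exact ⟨rest', by rw [this]⟩
                  obtain ⟨h', hh⟩ : ∃ h', h = '-' :: h' := by
                    subst hrest'
                    simp only [simpleSplit, if_neg (show ('-' : Char) ≠ '\n' by decide)] at hs
                    obtain ⟨hh, -⟩ := (List.cons.injEq _ _ _ _).mp hs
                    exact ⟨(simpleSplit rest').headI, hh.symm⟩
                  have hok : lineOk (c :: h) = true := by
                    subst hh hc
                    rw [lineOk, strip_cons_nonspace _ hsp',
                      rstrip_cons_nonspace h' (by decide)]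
                    simp [PySem.Chars.startswith, List.isPrefixOf]
                  rw [show altScan (c :: rest) = altScan (altSkipLine rest) by
                    simp [altScan, hsp', hdd]]
                  rw [hsplit]
                  simp only [List.all_cons, hok, Bool.true_and]
                  rcases skip_split rest with hsk | ⟨hsk, htail⟩
                  · rw [ih (altSkipLine rest) (le_trans (altSkipLine_length_le rest) hrest),
                      hsk, hs]
                    simp [lineOk, PySem.Chars.strip, PySem.Chars.lstrip, PySem.Chars.rstrip]
                  · rw [hsk]
                    rw [hs] at htail
                    simp only [List.tail_cons] at htail
                    simp [htail, altScan]
                · -- a real SQL line: both sides are false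
                  have hscan : altScan (c :: rest) = false := by
                    simp [altScan, hsp', hdd]
                  have hbad : lineOk (c :: h) = false := by
                    rw [lineOk, strip_cons_nonspace _ hsp']
                    simp only [List.isEmpty_cons, Bool.false_or]
                    by_cases hc : c = '-'
                    · subst hc
                      -- rest does not start with '-', so neither does h (nor rstrip h)
                      have hr : ∀ x, rest.head? = some x → x ≠ '-' := by
                        intro x hx hx'
                        subst hx'
                        cases rest with
                        | nil => simp at hx
                        | cons r rest' =>
                            simp only [List.head?_cons, Option.some.injEq] at hx
                            subst hx
                            simp [PySem.Chars.startswith, List.isPrefixOf] at hdd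
                      cases rest with
                      | nil =>
                          simp only [simpleSplit] at hs
                          obtain ⟨rfl, -⟩ := (List.cons.injEq _ _ _ _).mp hs
                          simp [PySem.Chars.rstrip, PySem.Chars.startswith, List.isPrefixOf]
                      | cons r rest' =>
                          by_cases hrn : r = '\n'
                          · subst hrn
                            simp only [simpleSplit] at hs
                            obtain ⟨rfl, -⟩ := (List.cons.injEq _ _ _ _).mp hs
                            simp [PySem.Chars.rstrip, PySem.Chars.startswith, List.isPrefixOf]
                          · simp only [simpleSplit, if_neg hrn] at hs
                            obtain ⟨hh, -⟩ := (List.cons.injEq _ _ _ _).mp hs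
                            rcases rstrip_head? h with hnil | hhd
                            · rw [hnil]
                              simp [PySem.Chars.startswith, List.isPrefixOf]
                            · have hr' : r ≠ '-' := hr r rfl
                              cases hrs : PySem.Chars.rstrip h with
                              | nil => simp [PySem.Chars.startswith, List.isPrefixOf]
                              | cons d ds =>
                                  have : d = r := by
                                    rw [hrs, ← hh] at hhd
                                    simpa using hhd
                                  subst this
                                  simp [PySem.Chars.startswith, List.isPrefixOf]
                                  exact fun hcon => hr' hcon.symm
                    · simp [PySem.Chars.startswith, List.isPrefixOf]
                      intro hcon
                      exact absurd hcon.symm hc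
                  rw [hscan, hsplit]
                  simp [hbad]

-- A's filter/map/isEmpty pipeline is the all-lines test
theorem filter_empty_eq_all (L : List (List Char)) :
    ((L.filter (fun line =>
        !PySem.Chars.startswith (PySem.Chars.strip line) ['-', '-']
          && !(PySem.Chars.strip line).isEmpty)).map (fun line => PySem.Chars.strip line)).isEmpty
      = L.all lineOk := by
  induction L with
  | nil => simp
  | cons l L ih =>
      simp only [List.filter_cons, List.all_cons, lineOk]
      cases hE : (PySem.Chars.strip l).isEmpty
        <;> cases hS : PySem.Chars.startswith (PySem.Chars.strip l) ['-', '-']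
        <;> simp [ih]

-- ===== VERDICT (by name: the statement is the Claim_ definition above) =====
theorem is_empty_sql_statement_py_spec : Claim_equal_is_empty_sql_statement_py := by
  intro sql _
  unfold Spec_is_empty_sql_statement_py is_empty_sql_statement_py is_empty_sql_statement_py_alt
  rw [splitOn_eq, filter_empty_eq_all, altScan_eq sql.toList.length sql.toList le_rfl]
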